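-- pv_equiv track=rewrite | github.com/jayeshmepani/poetry-analyzer-app | app/services/prosody.py | _foot_distribution
-- ===== SOURCE A (Python) =====
-- from typing import Dict, List, Tuple, Optional, Any
-- from collections import Counter
--
-- def _foot_distribution(patterns: List[List[str]]) -> Dict[str, int]:
--     """Count different foot types"""
--     feet = Counter()
--
--     for pattern in patterns:
--         i = 0
--         while i < len(pattern):
--             if i < len(pattern) and pattern[i] == "da":
--                 for j in range(i + 1, min(i + 4, len(pattern) + 1)):
--                     segment = pattern[i:j]
--                     if "DUM" in segment:
--                         feet[tuple(segment)] += 1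
--                         i = j
--                         break
--                 else:
--                     i += 1
--             else:
--                 for j in range(i + 1, min(i + 4, len(pattern) + 1)):
--                     segment = pattern[i:j]
--                     if "DUM" in segment:
--                         feet[tuple(segment)] += 1
--                         i = j
--                         break
--                 else:
--                     i += 1
--
--     named_feet = {}
--     for foot, count in feet.items():
--         foot_str = "-".join(foot)
--         if "da-DUM" in foot_str:
--             named_feet["iamb"] = named_feet.get("iamb", 0) + count
--         elif "DUM-da" in foot_str:
--             named_feet["trochee"] = named_feet.get("trochee", 0) + count
--         elif "da-da-DUM" in foot_str:
--             named_feet["anapest"] = named_feet.get("anapest", 0) + count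
--         elif "DUM-da-da" in foot_str:
--             named_feet["dactyl"] = named_feet.get("dactyl", 0) + count
--         elif "DUM-DUM" in foot_str:
--             named_feet["spondee"] = named_feet.get("spondee", 0) + count
--         elif "da-da" in foot_str:
--             named_feet["pyrrhus"] = named_feet.get("pyrrhus", 0) + count
--         else:
--             named_feet["other"] = named_feet.get("other", 0) + count
--
--     return named_feet
-- ===== SOURCE B (Python) =====
-- def _classify_foot(segment):
--     foot_str = "-".join(segment)
--     if "da-DUM" in foot_str:
--         return "iamb"
--     elif "DUM-da" in foot_str:
--         return "trochee"
--     elif "da-da-DUM" in foot_str: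
--         return "anapest"
--     elif "DUM-da-da" in foot_str:
--         return "dactyl"
--     elif "DUM-DUM" in foot_str:
--         return "spondee"
--     elif "da-da" in foot_str:
--         return "pyrrhus"
--     else:
--         return "other"
--
--
-- def _foot_distribution(patterns):
--     """Count different foot types"""
--     named_feet = {}
--     for pattern in patterns:
--         buf = []  # up to the last two unconsumed syllables (never "DUM")
--         for syl in pattern:
--             if syl == "DUM":
--                 name = _classify_foot(buf + [syl])
--                 named_feet[name] = named_feet.get(name, 0) + 1
--                 buf = []
--             else:
--                 buf = (buf + [syl])[-2:]
--     return named_feet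
-- ===== Notes on version B (the rewrite author's own statement) =====
-- stated objective: simpler
-- what changed: B replaces A's two-pass scheme (index-based window scan accumulating a Counter of segment tuples, then a reclassification pass over the counter) with a single index-free pass per pattern that keeps a sliding buffer of the last two unconsumed non-DUM syllables and classifies each segment into the named dict the moment its closing DUM is seen, eliminating the intermediate Counter.
import Mathlib
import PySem

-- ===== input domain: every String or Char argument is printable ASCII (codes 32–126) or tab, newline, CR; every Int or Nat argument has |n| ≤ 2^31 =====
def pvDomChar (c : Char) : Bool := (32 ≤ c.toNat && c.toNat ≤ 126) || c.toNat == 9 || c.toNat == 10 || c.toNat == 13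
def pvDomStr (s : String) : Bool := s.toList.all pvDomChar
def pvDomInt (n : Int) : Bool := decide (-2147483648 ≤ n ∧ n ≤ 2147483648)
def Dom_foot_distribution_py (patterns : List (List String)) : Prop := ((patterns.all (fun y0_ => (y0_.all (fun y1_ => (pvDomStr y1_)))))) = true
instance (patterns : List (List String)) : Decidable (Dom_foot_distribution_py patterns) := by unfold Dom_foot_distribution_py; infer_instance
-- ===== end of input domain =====

-- B replaces A's two-pass scheme (Counter of segment tuples, then a reclassification pass) by one
-- buffer-based pass that classifies each segment as it is found; same return value (objective: simpler).

-- ===== PORT A =====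
-- inner 'for j in range(i+1, min(i+4, len(pattern)+1)): … if "DUM" in segment: … break / else: …'
def pvInnerLoopA (p : List String) (i : Nat) : List Int → Option Int
  | [] => none
  | j :: js =>
    if (PySem.List.slice p (some (i : Int)) (some j)).contains "DUM" then some j
    else pvInnerLoopA p i js

def pvInnerScanA (p : List String) (i : Nat) : Option Int :=
  pvInnerLoopA p i (PySem.List.pyRange ((i : Int) + 1) (min ((i : Int) + 4) (PySem.List.len p + 1)) 1)

theorem pvInnerLoopA_mem {p : List String} {i : Nat} {js : List Int} {j : Int}
    (h : pvInnerLoopA p i js = some j) : j ∈ js := by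
  induction js with
  | nil => simp [pvInnerLoopA] at h
  | cons a as ih =>
    simp only [pvInnerLoopA] at h
    split at h
    · simp_all
    · exact List.mem_cons_of_mem _ (ih h)

theorem pvInnerScanA_bounds {p : List String} {i : Nat} {j : Int}
    (h : pvInnerScanA p i = some j) : (i : Int) < j ∧ j ≤ p.length := by
  have hm := pvInnerLoopA_mem h
  rw [PySem.List.mem_pyRange_one] at hm
  have := hm.1; have := hm.2
  simp [PySem.List.len_eq] at *
  omega

-- the 'while i < len(pattern): …' loop of A, threading the Counter 'feet'
def pvLoopA (p : List String) (feet : PySem.Dict (List String) Int) (i : Nat) :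
    PySem.Dict (List String) Int :=
  if h : i < p.length then
    if PySem.List.pyGetD p (i : Int) "" == "da" then
      match hs : pvInnerScanA p i with
      | some j =>
        pvLoopA p
          (feet.insert (PySem.List.slice p (some (i : Int)) (some j))
            (feet.getD (PySem.List.slice p (some (i : Int)) (some j)) 0 + 1)) j.toNat
      | none => pvLoopA p feet (i + 1)
    else
      match hs : pvInnerScanA p i with
      | some j =>
        pvLoopA p
          (feet.insert (PySem.List.slice p (some (i : Int)) (some j))
            (feet.getD (PySem.List.slice p (some (i : Int)) (some j)) 0 + 1)) j.toNat
      | none => pvLoopA p feet (i + 1)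
  else feet
termination_by p.length - i
decreasing_by
  · have := pvInnerScanA_bounds hs; omega
  · omega
  · have := pvInnerScanA_bounds hs; omega
  · omega

def foot_distribution_py (patterns : List (List String)) : List (String × Int) :=
  let feet := patterns.foldl (fun feet pattern => pvLoopA pattern feet 0) PySem.Dict.empty
  let named_feet := feet.items.foldl (fun nd fc =>
    let foot_str := PySem.Str.join "-" fc.1
    if PySem.Str.isIn "da-DUM" foot_str then nd.insert "iamb" (nd.getD "iamb" 0 + fc.2)
    else if PySem.Str.isIn "DUM-da" foot_str then nd.insert "trochee" (nd.getD "trochee" 0 + fc.2)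
    else if PySem.Str.isIn "da-da-DUM" foot_str then nd.insert "anapest" (nd.getD "anapest" 0 + fc.2)
    else if PySem.Str.isIn "DUM-da-da" foot_str then nd.insert "dactyl" (nd.getD "dactyl" 0 + fc.2)
    else if PySem.Str.isIn "DUM-DUM" foot_str then nd.insert "spondee" (nd.getD "spondee" 0 + fc.2)
    else if PySem.Str.isIn "da-da" foot_str then nd.insert "pyrrhus" (nd.getD "pyrrhus" 0 + fc.2)
    else nd.insert "other" (nd.getD "other" 0 + fc.2)) PySem.Dict.empty
  named_feet.items

-- ===== PORT B =====
def pvClassifyFoot (segment : List String) : String :=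
  let foot_str := PySem.Str.join "-" segment
  if PySem.Str.isIn "da-DUM" foot_str then "iamb"
  else if PySem.Str.isIn "DUM-da" foot_str then "trochee"
  else if PySem.Str.isIn "da-da-DUM" foot_str then "anapest"
  else if PySem.Str.isIn "DUM-da-da" foot_str then "dactyl"
  else if PySem.Str.isIn "DUM-DUM" foot_str then "spondee"
  else if PySem.Str.isIn "da-da" foot_str then "pyrrhus"
  else "other"

-- B's inner 'for syl in pattern: …' with the sliding buffer
def pvLoopB (named : PySem.Dict String Int) (buf : List String) :
    List String → PySem.Dict String Int
  | [] => named
  | syl :: rest =>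
    if syl == "DUM" then
      let name := pvClassifyFoot (buf ++ [syl])
      pvLoopB (named.insert name (named.getD name 0 + 1)) [] rest
    else pvLoopB named (PySem.List.slice (buf ++ [syl]) (some (-2)) none) rest

def foot_distribution_py_alt (patterns : List (List String)) : List (String × Int) :=
  (patterns.foldl (fun named pattern => pvLoopB named [] pattern) PySem.Dict.empty).items

-- ===== PRECONDITION & SPEC =====
def Spec_foot_distribution_py (patterns : List (List String)) (out : List (String × Int)) : Prop := out = foot_distribution_py_alt patterns
instance (patterns : List (List String)) (out : List (String × Int)) : Decidable (Spec_foot_distribution_py patterns out) := by unfold Spec_foot_distribution_py; infer_instance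

-- ===== CLAIM (what is proved, stated in full; the proofs are below) =====
def Claim_equal_foot_distribution_py : Prop := ∀ (patterns : List (List String)), Dom_foot_distribution_py patterns → Spec_foot_distribution_py patterns (foot_distribution_py patterns)

-- ===== LEMMAS AND PROOFS =====

-- ---- proof-side definitions ----

-- one counter update of A's scan: feet[tuple(segment)] += 1
def pvCntUpd (c : PySem.Dict (List String) Int) (s : List String) : PySem.Dict (List String) Int :=
  c.insert s (c.getD s 0 + 1)

-- one direct update of B's dict: named_feet[classify(segment)] += 1
def pvDirUpd (nd : PySem.Dict String Int) (s : List String) : PySem.Dict String Int :=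
  nd.insert (pvClassifyFoot s) (nd.getD (pvClassifyFoot s) 0 + 1)

-- A's second pass, folded over an items list, abstracted through pvClassifyFoot
def pvNamedFrom (nd : PySem.Dict String Int) (l : List (List String × Int)) : PySem.Dict String Int :=
  l.foldl (fun nd p => nd.insert (pvClassifyFoot p.1) (nd.getD (pvClassifyFoot p.1) 0 + p.2)) nd

-- the segments B's buffer scan extracts from one pattern
def pvSegsGo (b : List String) : List String → List (List String)
  | [] => []
  | x :: l =>
    if x = "DUM" then (b ++ [x]) :: pvSegsGo [] l
    else pvSegsGo (PySem.List.slice (b ++ [x]) (some (-2)) none) l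

-- the segments A's look-ahead scan extracts from one pattern
def pvSegsAhead : List String → List (List String)
  | [] => []
  | x :: l =>
    if x = "DUM" then [x] :: pvSegsAhead l
    else match l with
      | [] => []
      | y :: l' =>
        if y = "DUM" then [x, y] :: pvSegsAhead l'
        else match l' with
          | [] => []
          | z :: l'' =>
            if z = "DUM" then [x, y, z] :: pvSegsAhead l''
            else pvSegsAhead (y :: z :: l'')
termination_by l => l.length
decreasing_by all_goals (simp; try omega)

-- ---- B's loop is the direct fold over its segments ----
theorem pvLoopB_eq (p : List String) : ∀ (named : PySem.Dict String Int) (buf : List String),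
    pvLoopB named buf p = (pvSegsGo buf p).foldl pvDirUpd named := by
  induction p with
  | nil => intro named buf; rfl
  | cons syl rest ih =>
    intro named buf
    by_cases h : syl = "DUM"
    · simp only [pvLoopB, pvSegsGo, h, if_pos, beq_self_eq_true, if_true, List.foldl_cons]
      rw [ih]
      rfl
    · simp only [pvLoopB, pvSegsGo, if_neg h, beq_iff_eq, ih]

-- ---- the two scans produce the same segments ----
theorem pvSA_nil : pvSegsAhead [] = [] := by rw [pvSegsAhead.eq_def]
theorem pvSA_dum (l : List String) : pvSegsAhead ("DUM" :: l) = ["DUM"] :: pvSegsAhead l := by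
  rw [pvSegsAhead.eq_def]; simp
theorem pvSA_one (x : String) (hx : x ≠ "DUM") : pvSegsAhead [x] = [] := by
  rw [pvSegsAhead.eq_def]; simp [hx]
theorem pvSA_xdum (x : String) (l : List String) (hx : x ≠ "DUM") :
    pvSegsAhead (x :: "DUM" :: l) = [x, "DUM"] :: pvSegsAhead l := by
  rw [pvSegsAhead.eq_def]; simp [hx]
theorem pvSA_two (x y : String) (hx : x ≠ "DUM") (hy : y ≠ "DUM") : pvSegsAhead [x, y] = [] := by
  rw [pvSegsAhead.eq_def]; simp [hx, hy]
theorem pvSA_xydum (x y : String) (l : List String) (hx : x ≠ "DUM") (hy : y ≠ "DUM") :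
    pvSegsAhead (x :: y :: "DUM" :: l) = [x, y, "DUM"] :: pvSegsAhead l := by
  rw [pvSegsAhead.eq_def]; simp [hx, hy]
theorem pvSA_skip (x y z : String) (l : List String) (hx : x ≠ "DUM") (hy : y ≠ "DUM")
    (hz : z ≠ "DUM") : pvSegsAhead (x :: y :: z :: l) = pvSegsAhead (y :: z :: l) := by
  rw [pvSegsAhead.eq_def]; simp [hx, hy, hz]

-- buf[-2:] on the three buffer shapes B ever builds
theorem pvSlice2a (x : String) : PySem.List.slice [x] (some (-2)) none = [x] := by
  rw [PySem.List.slice_from_neg_ofNat _ 2 (by omega)]; simp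
theorem pvSlice2b (a x : String) : PySem.List.slice [a, x] (some (-2)) none = [a, x] := by
  rw [PySem.List.slice_from_neg_ofNat _ 2 (by omega)]; simp
theorem pvSlice2c (a c x : String) : PySem.List.slice [a, c, x] (some (-2)) none = [c, x] := by
  rw [PySem.List.slice_from_neg_ofNat _ 2 (by omega)]; rfl

theorem pvSegsAhead_go (l : List String) : ∀ b : List String, b.length ≤ 2 →
    (∀ s ∈ b, s ≠ "DUM") → pvSegsAhead (b ++ l) = pvSegsGo b l := by
  induction l with
  | nil =>
    intro b hb hnd
    match b, hb with
    | [], _ => simp [pvSA_nil, pvSegsGo]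
    | [a], _ =>
      have ha := hnd a (by simp)
      simp [pvSA_one a ha, pvSegsGo]
    | [a, c], _ =>
      have ha := hnd a (by simp)
      have hc := hnd c (by simp)
      simp [pvSA_two a c ha hc, pvSegsGo]
  | cons x l' ih =>
    intro b hb hnd
    by_cases hx : x = "DUM"
    · subst hx
      have hrest : pvSegsAhead l' = pvSegsGo [] l' := by
        simpa using ih [] (by simp) (by simp)
      match b, hb with
      | [], _ =>
        simp only [List.nil_append]
        rw [pvSA_dum, pvSegsGo, if_pos rfl]
        simp [hrest]
      | [a], _ =>
        have ha := hnd a (by simp)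
        simp only [List.cons_append, List.nil_append]
        rw [pvSA_xdum a l' ha, pvSegsGo, if_pos rfl]
        simp [hrest]
      | [a, c], _ =>
        have ha := hnd a (by simp)
        have hc := hnd c (by simp)
        simp only [List.cons_append, List.nil_append]
        rw [pvSA_xydum a c l' ha hc, pvSegsGo, if_pos rfl]
        simp [hrest]
    · match b, hb with
      | [], _ =>
        simp only [List.nil_append]
        rw [pvSegsGo, if_neg hx]
        simp only [List.nil_append, pvSlice2a]
        exact ih [x] (by simp) (by intro s hs; simp at hs; subst hs; exact hx)
      | [a], _ =>
        have ha := hnd a (by simp)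
        simp only [List.cons_append, List.nil_append]
        rw [pvSegsGo, if_neg hx]
        simp only [List.cons_append, List.nil_append, pvSlice2b]
        exact ih [a, x] (by simp)
          (by intro s hs; simp at hs; rcases hs with h | h <;> (subst h; assumption))
      | [a, c], _ =>
        have ha := hnd a (by simp)
        have hc := hnd c (by simp)
        simp only [List.cons_append, List.nil_append]
        rw [pvSegsGo, if_neg hx]
        simp only [List.cons_append, List.nil_append, pvSlice2c]
        rw [pvSA_skip a c x l' ha hc hx]
        exact ih [c, x] (by simp)
          (by intro s hs; simp at hs; rcases hs with h | h <;> (subst h; assumption))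

-- ---- evaluating A's inner window scan ----
theorem pvSliceI1 (p : List String) (i : Nat) :
    PySem.List.slice p (some (i : Int)) (some ((i : Int) + 1)) = (p.drop i).take 1 := by
  have h : ((i : Int) + 1) = ((i + 1 : Nat) : Int) := by push_cast; ring
  rw [h, PySem.List.slice_natCast]
  congr 1; omega

theorem pvSliceI2 (p : List String) (i : Nat) :
    PySem.List.slice p (some (i : Int)) (some ((i : Int) + 2)) = (p.drop i).take 2 := by
  have h : ((i : Int) + 2) = ((i + 2 : Nat) : Int) := by push_cast; ring
  rw [h, PySem.List.slice_natCast]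
  congr 1; omega

theorem pvSliceI3 (p : List String) (i : Nat) :
    PySem.List.slice p (some (i : Int)) (some ((i : Int) + 3)) = (p.drop i).take 3 := by
  have h : ((i : Int) + 3) = ((i + 3 : Nat) : Int) := by push_cast; ring
  rw [h, PySem.List.slice_natCast]
  congr 1; omega

theorem pvTake1 (a : String) (l : List String) : List.take 1 (a :: l) = [a] := by simp
theorem pvTake2 (a b : String) (l : List String) : List.take 2 (a :: b :: l) = [a, b] := by simp
theorem pvTake3 (a b c : String) (l : List String) : List.take 3 (a :: b :: c :: l) = [a, b, c] := by
  simp [List.take_succ_cons]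

theorem pvScan1 (p : List String) (i : Nat) (h : i < p.length) (hx : p[i] = "DUM") :
    pvInnerScanA p i = some ((i : Int) + 1) := by
  unfold pvInnerScanA
  rw [PySem.List.pyRange_one_cons (by simp [PySem.List.len_eq]; omega)]
  have hd0 : List.drop i p = p[i] :: List.drop (i + 1) p := List.drop_eq_getElem_cons h
  simp only [pvInnerLoopA, pvSliceI1]
  rw [hd0]
  simp [hx]

theorem pvScan_none1 (p : List String) (i : Nat) (h : p.length = i + 1)
    (hx : p[i]'(by omega) ≠ "DUM") : pvInnerScanA p i = none := by
  unfold pvInnerScanA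
  rw [PySem.List.pyRange_one_cons (by simp [PySem.List.len_eq]; omega)]
  rw [PySem.List.pyRange_one_eq_nil (by simp [PySem.List.len_eq]; omega)]
  have hd0 : List.drop i p = p[i]'(by omega) :: List.drop (i + 1) p :=
    List.drop_eq_getElem_cons (by omega)
  simp only [pvInnerLoopA, pvSliceI1]
  rw [hd0, pvTake1]
  simp [Ne.symm hx]

theorem pvScan2 (p : List String) (i : Nat) (h : i + 1 < p.length)
    (hx : p[i]'(by omega) ≠ "DUM") (hy : p[i+1] = "DUM") :
    pvInnerScanA p i = some ((i : Int) + 2) := by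
  unfold pvInnerScanA
  rw [PySem.List.pyRange_one_cons (by simp [PySem.List.len_eq]; omega)]
  rw [PySem.List.pyRange_one_cons (by simp [PySem.List.len_eq]; omega)]
  have e2 : ((i : Int) + 1 + 1) = (i : Int) + 2 := by ring
  rw [e2]
  have hd0 : List.drop i p = p[i]'(by omega) :: List.drop (i + 1) p :=
    List.drop_eq_getElem_cons (by omega)
  have hd1 : List.drop (i + 1) p = p[i+1] :: List.drop (i + 2) p :=
    List.drop_eq_getElem_cons (by omega)
  simp only [pvInnerLoopA, pvSliceI1, pvSliceI2]
  rw [hd0, hd1]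
  simp [Ne.symm hx, hy]

theorem pvScan_none2 (p : List String) (i : Nat) (h : p.length = i + 2)
    (hx : p[i]'(by omega) ≠ "DUM") (hy : p[i+1]'(by omega) ≠ "DUM") :
    pvInnerScanA p i = none := by
  unfold pvInnerScanA
  rw [PySem.List.pyRange_one_cons (by simp [PySem.List.len_eq]; omega)]
  rw [PySem.List.pyRange_one_cons (by simp [PySem.List.len_eq]; omega)]
  have e2 : ((i : Int) + 1 + 1) = (i : Int) + 2 := by ring
  rw [e2]
  rw [PySem.List.pyRange_one_eq_nil (by simp [PySem.List.len_eq]; omega)]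
  have hd0 : List.drop i p = p[i]'(by omega) :: List.drop (i + 1) p :=
    List.drop_eq_getElem_cons (by omega)
  have hd1 : List.drop (i + 1) p = p[i+1]'(by omega) :: List.drop (i + 2) p :=
    List.drop_eq_getElem_cons (by omega)
  simp only [pvInnerLoopA, pvSliceI1, pvSliceI2]
  rw [hd0, hd1, pvTake1, pvTake2]
  simp [Ne.symm hx, Ne.symm hy]

theorem pvScan3 (p : List String) (i : Nat) (h : i + 2 < p.length)
    (hx : p[i]'(by omega) ≠ "DUM") (hy : p[i+1]'(by omega) ≠ "DUM") (hz : p[i+2] = "DUM") :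
    pvInnerScanA p i = some ((i : Int) + 3) := by
  unfold pvInnerScanA
  rw [PySem.List.pyRange_one_cons (by simp [PySem.List.len_eq]; omega)]
  rw [PySem.List.pyRange_one_cons (by simp [PySem.List.len_eq]; omega)]
  have e2 : ((i : Int) + 1 + 1) = (i : Int) + 2 := by ring
  rw [e2]
  rw [PySem.List.pyRange_one_cons (by simp [PySem.List.len_eq]; omega)]
  have e3 : ((i : Int) + 2 + 1) = (i : Int) + 3 := by ring
  rw [e3]
  have hd0 : List.drop i p = p[i]'(by omega) :: List.drop (i + 1) p :=
    List.drop_eq_getElem_cons (by omega)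
  have hd1 : List.drop (i + 1) p = p[i+1]'(by omega) :: List.drop (i + 2) p :=
    List.drop_eq_getElem_cons (by omega)
  have hd2 : List.drop (i + 2) p = p[i+2] :: List.drop (i + 3) p :=
    List.drop_eq_getElem_cons (by omega)
  simp only [pvInnerLoopA, pvSliceI1, pvSliceI2, pvSliceI3]
  rw [hd0, hd1, hd2]
  simp [Ne.symm hx, Ne.symm hy, hz]

theorem pvScan_none3 (p : List String) (i : Nat) (h : i + 2 < p.length)
    (hx : p[i]'(by omega) ≠ "DUM") (hy : p[i+1]'(by omega) ≠ "DUM")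
    (hz : p[i+2] ≠ "DUM") : pvInnerScanA p i = none := by
  unfold pvInnerScanA
  rw [PySem.List.pyRange_one_cons (by simp [PySem.List.len_eq]; omega)]
  rw [PySem.List.pyRange_one_cons (by simp [PySem.List.len_eq]; omega)]
  have e2 : ((i : Int) + 1 + 1) = (i : Int) + 2 := by ring
  rw [e2]
  rw [PySem.List.pyRange_one_cons (by simp [PySem.List.len_eq]; omega)]
  have e3 : ((i : Int) + 2 + 1) = (i : Int) + 3 := by ring
  rw [e3]
  rw [PySem.List.pyRange_one_eq_nil (by simp [PySem.List.len_eq]; omega)]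
  have hd0 : List.drop i p = p[i]'(by omega) :: List.drop (i + 1) p :=
    List.drop_eq_getElem_cons (by omega)
  have hd1 : List.drop (i + 1) p = p[i+1]'(by omega) :: List.drop (i + 2) p :=
    List.drop_eq_getElem_cons (by omega)
  have hd2 : List.drop (i + 2) p = p[i+2] :: List.drop (i + 3) p :=
    List.drop_eq_getElem_cons (by omega)
  simp only [pvInnerLoopA, pvSliceI1, pvSliceI2, pvSliceI3]
  rw [hd0, hd1, hd2, pvTake1, pvTake2, pvTake3]
  simp [Ne.symm hx, Ne.symm hy, Ne.symm hz]

-- ---- A's while-loop is the counter fold over the look-ahead segments ----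
theorem pvLoopA_eq_aux (p : List String) : ∀ (n i : Nat) (feet : PySem.Dict (List String) Int),
    p.length - i ≤ n → pvLoopA p feet i = (pvSegsAhead (p.drop i)).foldl pvCntUpd feet := by
  intro n
  induction n with
  | zero =>
    intro i feet hn
    rw [pvLoopA, dif_neg (by omega), List.drop_eq_nil_of_le (by omega), pvSA_nil]
    rfl
  | succ n ih =>
    intro i feet hn
    by_cases h : i < p.length
    case neg =>
      rw [pvLoopA, dif_neg h, List.drop_eq_nil_of_le (by omega), pvSA_nil]
      rfl
    case pos =>
      have hd0 : List.drop i p = p[i] :: List.drop (i + 1) p := List.drop_eq_getElem_cons h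
      rw [pvLoopA, dif_pos h, ite_self]
      by_cases hx : p[i] = "DUM"
      · have hscan := pvScan1 p i h hx
        split
        case _ j hs =>
          have hj : j = (i : Int) + 1 := by rw [hscan] at hs; exact (Option.some.inj hs).symm
          subst hj
          have ht : ((i : Int) + 1).toNat = i + 1 := by omega
          rw [ht, pvSliceI1, hd0, pvTake1, hx, pvSA_dum, List.foldl_cons,
            ih (i + 1) _ (by omega)]
          rfl
        case _ hs => rw [hscan] at hs; cases hs
      · by_cases h1 : i + 1 < p.length
        · have hd1 : List.drop (i + 1) p = p[i+1] :: List.drop (i + 2) p :=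
            List.drop_eq_getElem_cons h1
          by_cases hy : p[i+1] = "DUM"
          · have hscan := pvScan2 p i h1 hx hy
            split
            case _ j hs =>
              have hj : j = (i : Int) + 2 := by rw [hscan] at hs; exact (Option.some.inj hs).symm
              subst hj
              have ht : ((i : Int) + 2).toNat = i + 2 := by omega
              rw [ht, pvSliceI2, hd0, hd1, pvTake2, hy,
                pvSA_xdum _ _ hx, List.foldl_cons, ih (i + 2) _ (by omega)]
              rfl
            case _ hs => rw [hscan] at hs; cases hs
          · by_cases h2 : i + 2 < p.length
            · have hd2 : List.drop (i + 2) p = p[i+2] :: List.drop (i + 3) p :=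
                List.drop_eq_getElem_cons h2
              by_cases hz : p[i+2] = "DUM"
              · have hscan := pvScan3 p i h2 hx hy hz
                split
                case _ j hs =>
                  have hj : j = (i : Int) + 3 := by
                    rw [hscan] at hs; exact (Option.some.inj hs).symm
                  subst hj
                  have ht : ((i : Int) + 3).toNat = i + 3 := by omega
                  rw [ht, pvSliceI3, hd0, hd1, hd2, pvTake3, hz,
                    pvSA_xydum _ _ _ hx hy, List.foldl_cons, ih (i + 3) _ (by omega)]
                  rfl
                case _ hs => rw [hscan] at hs; cases hs
              · have hscan := pvScan_none3 p i h2 hx hy hz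
                split
                case _ j hs => rw [hscan] at hs; cases hs
                case _ hs =>
                  rw [ih (i + 1) _ (by omega), hd0, hd1, hd2,
                    pvSA_skip _ _ _ _ hx hy hz, ← hd2, ← hd1]
            · have hlen : p.length = i + 2 := by omega
              have hscan := pvScan_none2 p i hlen hx hy
              split
              case _ j hs => rw [hscan] at hs; cases hs
              case _ hs =>
                have hd2 : List.drop (i + 2) p = [] := List.drop_eq_nil_of_le (by omega)
                rw [ih (i + 1) _ (by omega), hd0, hd1, hd2, pvSA_two _ _ hx hy,
                  pvSA_one _ hy]
        · have hlen : p.length = i + 1 := by omega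
          have hscan := pvScan_none1 p i hlen hx
          split
          case _ j hs => rw [hscan] at hs; cases hs
          case _ hs =>
            have hd1 : List.drop (i + 1) p = [] := List.drop_eq_nil_of_le (by omega)
            rw [ih (i + 1) _ (by omega), hd0, hd1, pvSA_one _ hx, pvSA_nil]

theorem pvLoopA_eq (p : List String) (feet : PySem.Dict (List String) Int) :
    pvLoopA p feet 0 = (pvSegsAhead p).foldl pvCntUpd feet := by
  simpa using pvLoopA_eq_aux p p.length 0 feet (by omega)

-- ---- dictionary lemmas: grouping through the counter commutes with direct aggregation ----
theorem pvNamedFrom_nil (nd : PySem.Dict String Int) : pvNamedFrom nd [] = nd := rfl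

theorem pvNamedFrom_cons (nd : PySem.Dict String Int) (p : List String × Int)
    (l : List (List String × Int)) :
    pvNamedFrom nd (p :: l)
      = pvNamedFrom (nd.insert (pvClassifyFoot p.1) (nd.getD (pvClassifyFoot p.1) 0 + p.2)) l :=
  rfl

theorem pvNamedFrom_append (nd : PySem.Dict String Int) (l1 l2 : List (List String × Int)) :
    pvNamedFrom nd (l1 ++ l2) = pvNamedFrom (pvNamedFrom nd l1) l2 :=
  List.foldl_append

theorem pvInsertComm (d : PySem.Dict String Int) (K K2 : String) (a b : Int)
    (hne : K ≠ K2) (hK : K ∈ d.keys) :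
    (d.insert K a).insert K2 b = (d.insert K2 b).insert K a := by
  have hcK : d.contains K = true := (PySem.Dict.contains_iff_mem_keys d K).mpr hK
  apply PySem.Dict.ext
  by_cases hc2 : d.contains K2 = true
  · rw [PySem.Dict.items_insert_of_contains _ _
        (by rw [PySem.Dict.contains_insert]; simp [hc2]),
      PySem.Dict.items_insert_of_contains _ _ hcK,
      PySem.Dict.items_insert_of_contains _ _
        (by rw [PySem.Dict.contains_insert]; simp [hcK]),
      PySem.Dict.items_insert_of_contains _ _ hc2,
      List.map_map, List.map_map]
    apply List.map_congr_left
    intro p _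
    by_cases e1 : p.1 = K <;> by_cases e2 : p.1 = K2 <;>
      simp [Function.comp, e1, e2, hne, Ne.symm hne]
  · have hc2' : d.contains K2 = false := by simpa using hc2
    rw [PySem.Dict.items_insert_of_not_contains _ _
        (by rw [PySem.Dict.contains_insert]; simp [hc2', Ne.symm hne]),
      PySem.Dict.items_insert_of_contains _ _ hcK,
      PySem.Dict.items_insert_of_contains _ _
        (by rw [PySem.Dict.contains_insert]; simp [hcK]),
      PySem.Dict.items_insert_of_not_contains _ _ hc2',
      List.map_append]
    simp [hne, Ne.symm hne]

theorem pvBumpComm (l : List (List String × Int)) : ∀ (nd : PySem.Dict String Int) (K : String),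
    K ∈ nd.keys →
    pvNamedFrom (nd.insert K (nd.getD K 0 + 1)) l
      = (pvNamedFrom nd l).insert K ((pvNamedFrom nd l).getD K 0 + 1) := by
  induction l with
  | nil => intro nd K _; rfl
  | cons tc l ih =>
    intro nd K hK
    obtain ⟨t, c2⟩ := tc
    rw [pvNamedFrom_cons, pvNamedFrom_cons]
    by_cases hKK : pvClassifyFoot (t, c2).1 = K
    · rw [hKK, PySem.Dict.getD_insert_self, PySem.Dict.insert_insert_self]
      have hb := ih (nd.insert K (nd.getD K 0 + c2)) K
        (by rw [PySem.Dict.mem_keys_insert]; left; rfl)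
      rw [PySem.Dict.getD_insert_self, PySem.Dict.insert_insert_self] at hb
      have e1 : nd.getD K 0 + 1 + c2 = nd.getD K 0 + c2 + 1 := by ring
      rw [e1, hb]
    · rw [PySem.Dict.getD_insert_of_ne _ _ _ hKK,
        pvInsertComm nd K (pvClassifyFoot (t, c2).1) _ _ (fun e => hKK e.symm) hK]
      have hb := ih (nd.insert (pvClassifyFoot (t, c2).1)
          (nd.getD (pvClassifyFoot (t, c2).1) 0 + c2)) K
        (by rw [PySem.Dict.mem_keys_insert]; right; exact hK)
      rw [PySem.Dict.getD_insert_of_ne _ _ _ (fun e => hKK e.symm)] at hb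
      rw [hb]

theorem pvMapBump (l : List (List String × Int)) : ∀ (nd : PySem.Dict String Int) (t : List String),
    (l.map Prod.fst).Nodup → t ∈ l.map Prod.fst →
    pvNamedFrom nd (l.map (fun p => if p.1 = t then (t, p.2 + 1) else p))
      = pvDirUpd (pvNamedFrom nd l) t := by
  induction l with
  | nil => intro nd t _ ht; simp at ht
  | cons kc l ih =>
    intro nd t hnd ht
    obtain ⟨k, c0⟩ := kc
    simp only [List.map_cons, List.nodup_cons] at hnd
    by_cases e : k = t
    · subst e
      have hnotin : k ∉ l.map Prod.fst := by simpa using hnd.1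
      have htail : l.map (fun p => if p.1 = k then (k, p.2 + 1) else p) = l := by
        have hpt : ∀ p ∈ l, (if p.1 = k then (k, p.2 + 1) else p) = p := by
          intro p hp
          rw [if_neg]
          intro hpe
          exact hnotin (hpe ▸ List.mem_map_of_mem hp)
        simpa using List.map_congr_left hpt
      simp only [List.map_cons, if_pos rfl, htail]
      rw [pvNamedFrom_cons, pvNamedFrom_cons, pvDirUpd]
      have hb := pvBumpComm l (nd.insert (pvClassifyFoot k) (nd.getD (pvClassifyFoot k) 0 + c0))
        (pvClassifyFoot k)
        (by rw [PySem.Dict.mem_keys_insert]; left; rfl)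
      rw [PySem.Dict.getD_insert_self, PySem.Dict.insert_insert_self] at hb
      have ep1 : ((k, c0 + 1) : List String × Int).1 = k := rfl
      have ep2 : ((k, c0 + 1) : List String × Int).2 = c0 + 1 := rfl
      have e1 : nd.getD (pvClassifyFoot k) 0 + (c0 + 1)
          = nd.getD (pvClassifyFoot k) 0 + c0 + 1 := by ring
      simp only [if_true, ep1, ep2, e1]
      rw [hb]
    · have ht' : t ∈ l.map Prod.fst := by
        simp only [List.map_cons, List.mem_cons] at ht
        rcases ht with h | h
        · exact absurd h.symm e
        · exact h
      simp only [List.map_cons, if_neg (show ¬((k, c0).1 = t) from e)]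
      rw [pvNamedFrom_cons, pvNamedFrom_cons]
      exact ih _ t hnd.2 ht'

theorem pvCntStep (c : PySem.Dict (List String) Int) (nd : PySem.Dict String Int)
    (s : List String) (hnd : c.keys.Nodup) :
    pvNamedFrom nd (pvCntUpd c s).items = pvDirUpd (pvNamedFrom nd c.items) s := by
  rw [pvCntUpd]
  by_cases hc : c.contains s = true
  · rw [PySem.Dict.items_insert_of_contains _ _ hc]
    have hstep : c.items.map (fun p => if (p.1 == s) = true then (s, c.getD s 0 + 1) else p)
        = c.items.map (fun p => if p.1 = s then (s, p.2 + 1) else p) := by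
      apply List.map_congr_left
      intro p hp
      by_cases e : p.1 = s
      · rw [if_pos (by simpa using e), if_pos e]
        have hv : c.getD s 0 = p.2 := by
          have hmem : (s, p.2) ∈ c.items := by
            have : p = (s, p.2) := by rw [← e]
            rw [← this]; exact hp
          exact PySem.Dict.getD_of_mem_items c hmem hnd 0
        rw [hv]
      · rw [if_neg (by simpa using e), if_neg e]
    rw [hstep]
    apply pvMapBump
    · have : c.items.map Prod.fst = c.keys := rfl
      rw [this]; exact hnd
    · have hk : s ∈ c.keys := (PySem.Dict.contains_iff_mem_keys c s).mp hc
      exact hk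
  · have hc' : c.contains s = false := by simpa using hc
    rw [PySem.Dict.items_insert_of_not_contains _ _ hc',
      PySem.Dict.getD_of_not_contains _ _ hc', pvNamedFrom_append, pvNamedFrom_cons,
      pvNamedFrom_nil, pvDirUpd]
    norm_num

theorem pvCntFold_nodup (l : List (List String)) :
    ((l.foldl pvCntUpd PySem.Dict.empty)).keys.Nodup :=
  PySem.Dict.nodup_keys_foldl_insert l (fun d x => d.getD x 0 + 1) PySem.Dict.empty
    PySem.Dict.nodup_keys_empty

theorem pvGrouping (segs : List (List String)) : ∀ nd : PySem.Dict String Int,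
    pvNamedFrom nd (segs.foldl pvCntUpd PySem.Dict.empty).items = segs.foldl pvDirUpd nd := by
  induction segs using List.reverseRecOn with
  | nil => intro nd; rfl
  | append_singleton l s ih =>
    intro nd
    rw [List.foldl_append, List.foldl_append, List.foldl_cons, List.foldl_nil,
      List.foldl_cons, List.foldl_nil, pvCntStep _ _ _ (pvCntFold_nodup l), ih nd]

-- ---- assembling ----
theorem pvFoldFlat {σ : Type} (pats : List (List String)) (f : List String → List (List String))
    (upd : σ → List String → σ) : ∀ init : σ,
    pats.foldl (fun acc p => (f p).foldl upd acc) init = (pats.flatMap f).foldl upd init := by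
  induction pats with
  | nil => intro init; simp
  | cons q qs ih => intro init; simp [List.foldl_append, ih]


-- A's inline classification step is the abstract pvNamedFrom step
theorem pvNamedStepA (nd : PySem.Dict String Int) (fc : List String × Int) :
    (let foot_str := PySem.Str.join "-" fc.1
     if PySem.Str.isIn "da-DUM" foot_str then nd.insert "iamb" (nd.getD "iamb" 0 + fc.2)
     else if PySem.Str.isIn "DUM-da" foot_str then nd.insert "trochee" (nd.getD "trochee" 0 + fc.2)
     else if PySem.Str.isIn "da-da-DUM" foot_str then nd.insert "anapest" (nd.getD "anapest" 0 + fc.2)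
     else if PySem.Str.isIn "DUM-da-da" foot_str then nd.insert "dactyl" (nd.getD "dactyl" 0 + fc.2)
     else if PySem.Str.isIn "DUM-DUM" foot_str then nd.insert "spondee" (nd.getD "spondee" 0 + fc.2)
     else if PySem.Str.isIn "da-da" foot_str then nd.insert "pyrrhus" (nd.getD "pyrrhus" 0 + fc.2)
     else nd.insert "other" (nd.getD "other" 0 + fc.2))
      = nd.insert (pvClassifyFoot fc.1) (nd.getD (pvClassifyFoot fc.1) 0 + fc.2) := by
  simp only [pvClassifyFoot]
  split_ifs <;> rfl

theorem pvSegsGo_eq_ahead (pat : List String) : pvSegsGo [] pat = pvSegsAhead pat := by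
  have h := pvSegsAhead_go pat [] (by simp) (by simp)
  simpa using h.symm

-- ===== VERDICT (by name: the statement is the Claim_ definition above) =====
theorem foot_distribution_py_spec : Claim_equal_foot_distribution_py := by
  unfold Claim_equal_foot_distribution_py
  intro patterns _
  unfold Spec_foot_distribution_py foot_distribution_py foot_distribution_py_alt
  simp only [pvLoopA_eq, pvLoopB_eq, pvSegsGo_eq_ahead, pvNamedStepA]
  rw [pvFoldFlat patterns pvSegsAhead pvCntUpd PySem.Dict.empty,
    pvFoldFlat patterns pvSegsAhead pvDirUpd PySem.Dict.empty]
  have hg := pvGrouping (patterns.flatMap pvSegsAhead) PySem.Dict.empty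
  simp only [pvNamedFrom] at hg
  rw [hg]
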